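-- pv_equiv track=rewrite | github.com/sujungeee/python-programmers | practice/80.py | solution
-- ===== SOURCE A (Python) =====
-- def solution(amount):
--     unit= [100, 50, 10, 1]
--     answer= []
--
--     for coin in unit:
--         while amount>= coin:
--             answer.append(coin)
--             amount -= coin
--
--     return answer
-- ===== SOURCE B (Python) =====
-- def solution(amount):
--     answer = []
--     for coin in [100, 50, 10, 1]:
--         count = amount // coin
--         if count > 0:
--             answer += [coin] * count
--             amount -= coin * count
--     return answer
-- ===== Notes on version B (the rewrite author's own statement) =====
-- stated objective: simpler
-- what changed: Replaces the inner one-coin-at-a-time while-subtraction loop with a closed-form floor-division count per denomination, extending the answer with [coin]*count in one step.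
import Mathlib
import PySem

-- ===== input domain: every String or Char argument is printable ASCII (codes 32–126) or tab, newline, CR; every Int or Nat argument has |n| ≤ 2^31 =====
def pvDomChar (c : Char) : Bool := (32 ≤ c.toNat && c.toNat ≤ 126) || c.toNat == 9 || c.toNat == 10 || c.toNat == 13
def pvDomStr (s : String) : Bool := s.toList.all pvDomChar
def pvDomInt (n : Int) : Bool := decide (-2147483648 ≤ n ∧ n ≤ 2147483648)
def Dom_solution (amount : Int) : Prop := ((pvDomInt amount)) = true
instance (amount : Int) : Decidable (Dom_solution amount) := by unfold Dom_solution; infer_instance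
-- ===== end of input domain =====

-- B replaces A's inner one-coin-at-a-time subtraction loop by a closed-form floor-division count
-- per denomination (simpler); same return value on every int input.

-- ===== PORT A =====
-- the inner `while amount >= coin: answer.append(coin); amount -= coin` loop; the extra
-- `0 < coin` guard only makes the recursion total (Python would not terminate for coin ≤ 0;
-- A only ever calls it with positive coins)
def loopA (coin a : Int) : List Int × Int :=
  if h : coin ≤ a ∧ 0 < coin then
    let r := loopA coin (a - coin)
    (coin :: r.1, r.2)
  else ([], a)
termination_by a.toNat
decreasing_by omega

def solution (amount : Int) : List Int :=
  (([100, 50, 10, 1] : List Int).foldl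
    (fun st coin => let r := loopA coin st.1; (r.2, st.2 ++ r.1))
    (amount, ([] : List Int))).2

-- ===== PORT B =====
def solution_alt (amount : Int) : List Int :=
  (([100, 50, 10, 1] : List Int).foldl
    (fun st coin =>
      let count := PySem.Int.floordiv st.1 coin
      if 0 < count then (st.1 - coin * count, st.2 ++ List.replicate count.toNat coin) else st)
    (amount, ([] : List Int))).2

-- ===== PRECONDITION & SPEC =====
def Spec_solution (amount : Int) (out : List Int) : Prop := out = solution_alt amount
instance (amount : Int) (out : List Int) : Decidable (Spec_solution amount out) := by unfold Spec_solution; infer_instance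

-- ===== CLAIM (what is proved, stated in full; the proofs are below) =====
def Claim_equal_solution : Prop := ∀ (amount : Int), Dom_solution amount → Spec_solution amount (solution amount)

-- ===== LEMMAS AND PROOFS =====

theorem loopA_closed (coin : Int) (hc : 0 < coin) (a : Int) :
    loopA coin a =
      (List.replicate (PySem.Int.floordiv a coin).toNat coin,
       if 0 < PySem.Int.floordiv a coin then a - coin * PySem.Int.floordiv a coin else a) := by
  rw [loopA]
  by_cases h : coin ≤ a ∧ 0 < coin
  · rw [dif_pos h]
    have IH := loopA_closed coin hc (a - coin)
    have hq1 : (1 : Int) ≤ PySem.Int.floordiv a coin :=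
      (PySem.Int.le_floordiv_iff_mul_le hc).mpr (by linarith [h.1])
    have hstep : PySem.Int.floordiv (a - coin) coin = PySem.Int.floordiv a coin - 1 := by
      rw [PySem.Int.floordiv_eq_ediv_of_pos hc, PySem.Int.floordiv_eq_ediv_of_pos hc]
      have he : a - coin = a + (-1) * coin := by ring
      rw [he, Int.add_mul_ediv_right _ _ (show coin ≠ 0 by omega)]
      ring
    rw [if_pos (by omega : (0 : Int) < PySem.Int.floordiv a coin)]
    simp only [IH, hstep, Prod.mk.injEq]
    constructor
    · have hn : (PySem.Int.floordiv a coin).toNat = (PySem.Int.floordiv a coin - 1).toNat + 1 := by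
        omega
      rw [hn, List.replicate_succ]
    · split_ifs with h2
      · ring
      · have hq : PySem.Int.floordiv a coin = 1 := by omega
        rw [hq]; ring
  · rw [dif_neg h]
    have hlt : a < coin := by
      by_contra hx
      exact h ⟨by omega, hc⟩
    have hle : ¬ (1 : Int) ≤ PySem.Int.floordiv a coin := by
      intro hx
      have := (PySem.Int.le_floordiv_iff_mul_le hc).mp hx
      omega
    have hq : (PySem.Int.floordiv a coin).toNat = 0 := by omega
    rw [if_neg (by omega : ¬ (0 : Int) < PySem.Int.floordiv a coin), hq]
    simp
termination_by a.toNat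
decreasing_by omega

theorem step_eq (coin : Int) (hc : 0 < coin) (st : Int × List Int) :
    ((loopA coin st.1).2, st.2 ++ (loopA coin st.1).1) =
      (if 0 < PySem.Int.floordiv st.1 coin then
        (st.1 - coin * PySem.Int.floordiv st.1 coin,
         st.2 ++ List.replicate (PySem.Int.floordiv st.1 coin).toNat coin)
       else st) := by
  rw [loopA_closed coin hc st.1]
  by_cases h : 0 < PySem.Int.floordiv st.1 coin
  · simp [h]
  · have hq : (PySem.Int.floordiv st.1 coin).toNat = 0 := by omega
    simp [h, hq]

theorem foldl_step_eq (l : List Int) (hl : ∀ c ∈ l, 0 < c) (st : Int × List Int) :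
    l.foldl (fun st coin => let r := loopA coin st.1; (r.2, st.2 ++ r.1)) st =
      l.foldl (fun st coin =>
        let count := PySem.Int.floordiv st.1 coin
        if 0 < count then (st.1 - coin * count, st.2 ++ List.replicate count.toNat coin) else st)
        st := by
  induction l generalizing st with
  | nil => rfl
  | cons c t ih =>
    simp only [List.foldl_cons]
    rw [ih (fun x hx => hl x (List.mem_cons_of_mem _ hx))]
    congr 1
    exact step_eq c (hl c List.mem_cons_self) st

-- ===== VERDICT (by name: the statement is the Claim_ definition above) =====
theorem solution_spec : Claim_equal_solution := by
  intro amount _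
  unfold Spec_solution solution solution_alt
  exact congrArg Prod.snd (foldl_step_eq _ (by decide) _)
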